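-- pv_equiv track=rewrite | github.com/ZeinMoh/Data-Structure-and-Algorithms-in-Python | Sorting Algorithms/Inseration Sort.py | inseration_sort
-- ===== SOURCE A (Python) =====
-- def inseration_sort(data):
--     l=len(data)
--     dataresult=l*[None]
--     for i in range(l):
--         count=0
--         for j in range(l):
--             if data[j]<=data[i]:
--                 count+=1
--         dataresult[count-1]=data[i]
--     return dataresult
-- ===== SOURCE B (Python) =====
-- def inseration_sort(data):
--     return sorted(data)
-- ===== Notes on version B (the rewrite author's own statement) =====
-- stated objective: idiomatic
-- what changed: Replaces the quadratic rank-counting placement (for each element, count how many elements are <= it and write it at that slot) with a single library sort.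
-- outside the precondition, e.g. on inseration_sort([1, 1]): A returns [None, 1], B returns [1, 1]
import Mathlib
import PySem

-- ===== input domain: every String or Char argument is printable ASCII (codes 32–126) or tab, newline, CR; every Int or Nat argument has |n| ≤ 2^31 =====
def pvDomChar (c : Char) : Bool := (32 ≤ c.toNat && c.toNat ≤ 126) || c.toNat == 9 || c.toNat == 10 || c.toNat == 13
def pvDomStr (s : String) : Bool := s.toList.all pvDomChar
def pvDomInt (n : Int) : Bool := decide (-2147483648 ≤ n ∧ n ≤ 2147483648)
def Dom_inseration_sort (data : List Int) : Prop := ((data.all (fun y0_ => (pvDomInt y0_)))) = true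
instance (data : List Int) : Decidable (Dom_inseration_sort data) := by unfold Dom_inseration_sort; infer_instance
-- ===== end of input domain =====

-- B replaces A's rank-counting placement loop with a single library sort.
-- ===== PORT A =====
-- Internally the result list holds Option Int (Python's None slots); Python leaves None
-- entries exactly when data has duplicates, which Pre_ excludes, so the final
-- `.map (·.getD 0)` is exact on every admitted input.
def inseration_sort (data : List Int) : List Int :=
  let l : Int := data.length
  let dataresult : List (Option Int) := List.replicate data.length none
  let res := (PySem.List.pyRange 0 l 1).foldl
    (fun dataresult i =>
      let di := PySem.List.pyGetD data i 0
      let count : Int := (PySem.List.pyRange 0 l 1).foldl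
        (fun count j => if PySem.List.pyGetD data j 0 ≤ di then count + 1 else count) 0
      dataresult.set (count - 1).toNat (some di)) dataresult
  res.map (fun o => o.getD 0)

-- ===== PORT B =====
def inseration_sort_alt (data : List Int) : List Int :=
  PySem.List.sorted data (fun x => x) false

-- ===== PRECONDITION & SPEC =====
-- Pre_ excludes lists containing a duplicated value: there Python A returns a list with
-- None entries (not ints, outside the declared return type List Int).
def Pre_inseration_sort (data : List Int) : Prop := data.Nodup

instance (data : List Int) : Decidable (Pre_inseration_sort data) := by
  unfold Pre_inseration_sort; infer_instance

def pvWitness_inseration_sort : List Int := [3, 1, 2]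

def Spec_inseration_sort (data : List Int) (out : List Int) : Prop := out = inseration_sort_alt data
instance (data : List Int) (out : List Int) : Decidable (Spec_inseration_sort data out) := by unfold Spec_inseration_sort; infer_instance

-- ===== CLAIM (what is proved, stated in full; the proofs are below) =====
def Claim_equal_inseration_sort : Prop := ∀ (data : List Int), Dom_inseration_sort data → Pre_inseration_sort data → Spec_inseration_sort data (inseration_sort data)

-- ===== LEMMAS AND PROOFS =====

-- length of the set-fold is the length of the accumulator
theorem pv_fold_set_length {α β : Type} (pos : α → Nat) (f : α → β) :
    ∀ (l : List α) (acc : List β),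
      (l.foldl (fun r v => r.set (pos v) (f v)) acc).length = acc.length := by
  intro l
  induction l with
  | nil => intro acc; rfl
  | cons a t ih => intro acc; simp [List.foldl_cons, ih, List.length_set]

-- a position never written keeps the accumulator's entry
theorem pv_fold_set_untouched {α β : Type} (pos : α → Nat) (f : α → β) :
    ∀ (l : List α) (acc : List β) (k : Nat),
      (∀ v ∈ l, pos v ≠ k) →
      (l.foldl (fun r v => r.set (pos v) (f v)) acc)[k]? = acc[k]? := by
  intro l
  induction l with
  | nil => intro acc k _; rfl
  | cons a t ih =>
    intro acc k h
    simp only [List.foldl_cons]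
    rw [ih _ _ (fun v hv => h v (List.mem_cons_of_mem _ hv))]
    rw [List.getElem?_set_ne (h a (List.mem_cons_self))]

-- a position written exactly once holds that write
theorem pv_fold_set_written {α β : Type} (pos : α → Nat) (f : α → β) :
    ∀ (l : List α) (acc : List β) (k : Nat) (v : α),
      v ∈ l → pos v = k → k < acc.length →
      (∀ w ∈ l, pos w = k → w = v) →
      (l.foldl (fun r v => r.set (pos v) (f v)) acc)[k]? = some (f v) := by
  intro l
  induction l with
  | nil => intro _ _ _ hv; exact absurd hv (List.not_mem_nil)
  | cons a t ih =>
    intro acc k v hv hpos hk huniq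
    simp only [List.foldl_cons]
    by_cases hav : v = a
    · subst hav
      by_cases hwt : ∃ w ∈ t, pos w = k
      · obtain ⟨w, hw, hwk⟩ := hwt
        have : w = v := huniq w (List.mem_cons_of_mem _ hw) hwk
        subst this
        exact ih _ _ _ hw hwk (by simp [List.length_set, hk])
          (fun u hu huk => huniq u (List.mem_cons_of_mem _ hu) huk)
      · rw [pv_fold_set_untouched pos f t _ k (fun w hw hk' => hwt ⟨w, hw, hk'⟩), hpos,
          List.getElem?_set_self (by simpa [hpos] using hk)]
    · have hv' : v ∈ t := by
        rcases List.mem_cons.mp hv with h | h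
        · exact absurd h hav
        · exact h
      exact ih _ _ _ hv' hpos (by simp [List.length_set, hk])
        (fun u hu huk => huniq u (List.mem_cons_of_mem _ hu) huk)

-- strictly increasing list: the number of elements ≤ the j-th one is j+1
theorem pv_countP_le_sorted :
    ∀ (s : List Int), s.Pairwise (· < ·) → ∀ (j : Nat) (v : Int), s[j]? = some v →
      s.countP (fun x => decide (x ≤ v)) = j + 1 := by
  intro s
  induction s with
  | nil => intro _ j v hv; simp at hv
  | cons a t ih =>
    intro hp j v hv
    have hpa := (List.pairwise_cons.mp hp).1
    have hpt := (List.pairwise_cons.mp hp).2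
    cases j with
    | zero =>
      have hva : v = a := by simpa using hv.symm
      subst hva
      have h0 : t.countP (fun x => decide (x ≤ v)) = 0 := by
        rw [List.countP_eq_zero]
        intro x hx
        simpa using not_le.mpr (hpa x hx)
      simp [h0]
    | succ j' =>
      have hv' : t[j']? = some v := by simpa using hv
      have hvt : v ∈ t := by
        have := List.getElem?_eq_some_iff.mp hv'
        obtain ⟨h, hh⟩ := this
        exact hh ▸ List.getElem_mem h
      have ha : a ≤ v := le_of_lt (hpa v hvt)
      have hih := ih hpt j' v hv'
      simp [hih, ha]

-- the sorted output is strictly increasing when the input has no duplicates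
theorem pv_sorted_strict (data : List Int) (hnd : data.Nodup) :
    (PySem.List.sorted data (fun x => x) false).Pairwise (· < ·) := by
  have hperm : (PySem.List.sorted data (fun x => x) false).Perm data :=
    PySem.List.sorted_perm data (fun x => x) false
  have hnd' : (PySem.List.sorted data (fun x => x) false).Nodup := hperm.nodup_iff.mpr hnd
  have hle : (PySem.List.sorted data (fun x => x) false).Pairwise (fun a b => a ≤ b) := by
    simpa using PySem.List.sorted_pairwise data (fun x => x)
  exact (List.Pairwise.and hle hnd').imp (fun h => lt_of_le_of_ne h.1 h.2)

-- the rank of the j-th sorted element within data is j+1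
theorem pv_rank_eq (data : List Int) (hnd : data.Nodup)
    (j : Nat) (v : Int) (hv : (PySem.List.sorted data (fun x => x) false)[j]? = some v) :
    data.countP (fun x => decide (x ≤ v)) = j + 1 := by
  have hperm : (PySem.List.sorted data (fun x => x) false).Perm data :=
    PySem.List.sorted_perm data (fun x => x) false
  rw [← hperm.countP_eq]
  exact pv_countP_le_sorted _ (pv_sorted_strict data hnd) j v hv

-- ===== VERDICT (by name: the statement is the Claim_ definition above) =====
theorem inseration_sort_spec : Claim_equal_inseration_sort := by
  intro data _ hnd
  unfold Spec_inseration_sort inseration_sort_alt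
  set s := PySem.List.sorted data (fun x => x) false with hs
  have hperm : s.Perm data := PySem.List.sorted_perm data (fun x => x) false
  have hlen : s.length = data.length := hperm.length_eq
  have hcount : ∀ di : Int,
      (PySem.List.pyRange 0 (data.length : Int) 1).foldl
        (fun count j => if PySem.List.pyGetD data j 0 ≤ di then count + 1 else count) 0
      = ((data.countP (fun x => decide (x ≤ di)) : Int)) := by
    intro di
    rw [PySem.List.foldl_pyRange_zero_pyGetD' data 0
      (fun count x => if x ≤ di then count + 1 else count) 0]
    rw [PySem.List.foldl_ite_add_one (fun x => x ≤ di)]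
    simp
  set pos : Int → Nat := fun v => (((data.countP (fun x => decide (x ≤ v))) : Int) - 1).toNat
    with hposdef
  have houter := PySem.List.foldl_pyRange_zero_pyGetD' data 0
    (fun (r : List (Option Int)) (v : Int) => r.set (pos v) (some v))
    (List.replicate data.length (none : Option Int))
  have hfold :
      (data.foldl (fun dataresult di => dataresult.set (pos di) (some di))
        (List.replicate data.length (none : Option Int))) = s.map some := by
    apply List.ext_getElem?
    intro k
    by_cases hk : k < data.length
    · -- the k-th sorted element is written at position k, uniquely
      have hkj : k < s.length := by omega
      have hvmem : s[k] ∈ data := hperm.mem_iff.mp (List.getElem_mem hkj)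
      have hposk : pos s[k] = k := by
        simp only [hposdef]
        rw [pv_rank_eq data hnd k s[k] (List.getElem?_eq_getElem hkj)]
        omega
      have huniq : ∀ w ∈ data, pos w = k → w = s[k] := by
        intro w hw hwk
        obtain ⟨j, hj, hwj⟩ := List.getElem_of_mem (hperm.mem_iff.mpr hw)
        have hpj : pos s[j] = j := by
          simp only [hposdef]
          rw [pv_rank_eq data hnd j s[j] (List.getElem?_eq_getElem hj)]
          omega
        rw [← hwj] at hwk
        rw [hpj] at hwk
        subst hwk
        exact hwj.symm
      rw [pv_fold_set_written pos (fun v => some v) data _ k s[k] hvmem hposk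
        (by simpa using hk) huniq]
      rw [List.getElem?_map, List.getElem?_eq_getElem hkj]
      rfl
    · have h1 : (data.foldl (fun dataresult di => dataresult.set (pos di) (some di))
          (List.replicate data.length (none : Option Int))).length = data.length := by
        rw [pv_fold_set_length pos (fun v => some v) data
          (List.replicate data.length (none : Option Int))]
        simp
      rw [List.getElem?_eq_none (by omega),
        List.getElem?_eq_none (by simp [hlen]; omega)]
  show inseration_sort data = s
  unfold inseration_sort
  simp only [hcount]
  have hpose : ∀ v : Int,
      (((data.countP (fun x => decide (x ≤ v)) : Int)) - 1).toNat = pos v := fun v => rfl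
  simp only [hpose]
  rw [houter, hfold]
  simp
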